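-- pv_equiv track=rewrite | github.com/SuperscriptSystems/Quillio | app.py | extract_assessments_from_ai_response
-- ===== SOURCE A (Python) =====
-- def extract_assessments_from_ai_response(ai_response, num_answers):
--     assessments = []
--     for i in range(num_answers):
--         start_text = f"Assessment{i + 1}:"
--         next_text = f"Assessment{i + 2}:"
--         start_index = ai_response.find(start_text)
--         if i + 1 < num_answers:
--             end_index = ai_response.find(next_text)
--         else:
--             end_index = len(ai_response)
--
--         if start_index != -1:
--             assessment = ai_response[start_index + len(start_text):end_index].strip()
--         else:
--             assessment = "No assessment"
--         assessments.append(assessment)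
--     return assessments
-- ===== SOURCE B (Python) =====
-- def extract_assessments_from_ai_response(ai_response, num_answers):
--     # One left-to-right scan records the first index of every "Assessment<digits>:"
--     # marker; each section is then the slice from its marker to the next (or to the
--     # end of the string for the last section or when the next marker is absent).
--     M = "Assessment"
--     n = len(ai_response)
--     first = {}
--     for j in range(n):
--         if ai_response.startswith(M, j):
--             p = j + len(M)
--             q = p
--             while q < n and ai_response[q].isdigit():
--                 q += 1
--             if q > p and q < n and ai_response[q] == ':':
--                 ds = ai_response[p:q]
--                 if ds not in first:
--                     first[ds] = j
--     out = []
--     for i in range(num_answers):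
--         key = str(i + 1)
--         start = first.get(key)
--         if start is None:
--             out.append("No assessment")
--         else:
--             if i + 1 < num_answers:
--                 end = first.get(str(i + 2), n)
--             else:
--                 end = n
--             out.append(ai_response[start + len(M) + len(key) + 1:end].strip())
--     return out
-- ===== Notes on version B (the rewrite author's own statement) =====
-- stated objective: faster
-- what changed: A calls str.find twice per answer (each a full scan of the response); B makes one left-to-right scan that records the first index of every 'Assessment<digits>:' marker in a dict and then slices between the recorded indices, ending a section at the end of the string when the next marker is absent.
-- intended difference: When some 'Assessment(i+1):' marker is present but 'Assessment(i+2):' is absent (for i+1 < num_answers), A slices that section to str.find's -1 and so silently drops the last character of the response (visible exactly when the slice is nonempty and the last character is not whitespace); B ends the section at the end of the string, which is the intended extent. — e.g. on extract_assessments_from_ai_response("Assessment1: hi", 2): A returns ["h", "No assessment"], B returns ["hi", "No assessment"]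
import Mathlib
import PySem

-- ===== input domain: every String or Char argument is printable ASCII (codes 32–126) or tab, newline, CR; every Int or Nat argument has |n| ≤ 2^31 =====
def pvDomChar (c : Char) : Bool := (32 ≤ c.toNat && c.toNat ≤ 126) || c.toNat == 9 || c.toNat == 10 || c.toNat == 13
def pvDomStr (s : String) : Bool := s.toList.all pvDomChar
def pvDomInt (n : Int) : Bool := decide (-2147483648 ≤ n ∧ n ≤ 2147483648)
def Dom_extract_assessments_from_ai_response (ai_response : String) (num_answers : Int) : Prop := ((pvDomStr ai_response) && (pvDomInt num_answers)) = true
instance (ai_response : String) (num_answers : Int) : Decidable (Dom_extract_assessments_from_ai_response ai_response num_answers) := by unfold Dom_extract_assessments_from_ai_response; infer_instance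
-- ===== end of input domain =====

-- B replaces A's repeated str.find calls (two scans of the string per loop iteration) by ONE
-- left-to-right scan recording the first index of every "Assessment<digits>:" marker; when the
-- next marker is absent B ends the section at the end of the string (A slices to find's -1,
-- dropping the last character — the stated intended difference D_ below).

-- ===== PORT A =====
-- the f-string f"Assessment{k}:" of A
def pvMarkerOf (k : Int) : List Char := "Assessment".toList ++ PySem.Int.toChars k ++ [':']

def extract_assessments_from_ai_response (ai_response : String) (num_answers : Int) : List String :=
  let s := ai_response.toList
  (PySem.List.pyRange 0 num_answers 1).foldl (fun assessments i =>
    let start_text := pvMarkerOf (i + 1)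
    let next_text  := pvMarkerOf (i + 2)
    let start_index := PySem.Chars.find s start_text
    let end_index := if i + 1 < num_answers then PySem.Chars.find s next_text else (s.length : Int)
    let assessment :=
      if start_index ≠ -1 then
        String.ofList (PySem.Chars.strip (PySem.Chars.slice s (some (start_index + (start_text.length : Int))) (some end_index)))
      else "No assessment"
    assessments ++ [assessment]) []

-- ===== PORT B =====
-- Source B's inner "advance q while s[q] is a digit" loop is the takeWhile below; the head? test is
-- its "q < n and s[q] == ':'" check (exact: head? is none exactly when q = n).
def pvMatchAt (cs : List Char) : Option (List Char) :=
  if "Assessment".toList.isPrefixOf cs then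
    let rest := cs.drop "Assessment".toList.length
    let ds := rest.takeWhile PySem.Chars.isdigit
    if (!ds.isEmpty) && ((rest.drop ds.length).head? == some ':') then some ds else none
  else none

def pvScan (s : List Char) : PySem.Dict (List Char) Int :=
  (PySem.List.pyRange 0 (s.length : Int) 1).foldl
    (fun first j =>
      match pvMatchAt (s.drop j.toNat) with   -- j ∈ range(len(s)) is nonnegative, so .toNat is exact
      | some ds => if first.contains ds then first else first.insert ds j
      | none => first)
    PySem.Dict.empty

def extract_assessments_from_ai_response_alt (ai_response : String) (num_answers : Int) : List String :=
  let s := ai_response.toList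
  let n := (s.length : Int)
  let first := pvScan s
  (PySem.List.pyRange 0 num_answers 1).foldl (fun out i =>
    let key := PySem.Int.toChars (i + 1)
    out ++ [match first.get? key with
      | none => "No assessment"
      | some start =>
        let end_ := if i + 1 < num_answers then first.getD (PySem.Int.toChars (i + 2)) n else n
        String.ofList (PySem.Chars.strip (PySem.Chars.slice s
          (some (start + ("Assessment".toList.length : Int) + (key.length : Int) + 1)) (some end_)))]) []

-- ===== PRECONDITION & SPEC =====
-- When some "Assessment(k):" marker (1 ≤ k, k < num_answers; k read off the digits after the
-- marker head) occurs strictly before the last character but "Assessment(k+1):" is absent,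
-- and the last character is not whitespace,
-- A slices that section to str.find's -1 and silently drops the last character of the response,
-- while B ends the section at the end of the string, which is the intended extent of the section.
-- the decimal value of the digit run starting a suffix (candidate marker numbers)
def pvKey (l : List Char) : Int :=
  (l.takeWhile PySem.Chars.isdigit).foldl (fun a c => a * 10 + ((c.toNat : Int) - 48)) 0

def D_extract_assessments_from_ai_response (ai_response : String) (num_answers : Int) : Prop :=
  ¬ ai_response.toList.getLast?.all PySem.Chars.isspace = true ∧
  ∃ k ∈ ai_response.toList.tails.map pvKey,
    1 ≤ k ∧ k < num_answers ∧
    pvMarkerOf k <:+: ai_response.toList.dropLast ∧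
    ¬ pvMarkerOf (k + 1) <:+: ai_response.toList
instance (ai_response : String) (num_answers : Int) : Decidable (D_extract_assessments_from_ai_response ai_response num_answers) := by unfold D_extract_assessments_from_ai_response; infer_instance

def Spec_extract_assessments_from_ai_response (ai_response : String) (num_answers : Int) (out : List String) : Prop := ¬ D_extract_assessments_from_ai_response ai_response num_answers → out = extract_assessments_from_ai_response_alt ai_response num_answers
instance (ai_response : String) (num_answers : Int) (out : List String) : Decidable (Spec_extract_assessments_from_ai_response ai_response num_answers out) := by unfold Spec_extract_assessments_from_ai_response; infer_instance

def pvDiffWitness_extract_assessments_from_ai_response : String × Int := ("Assessment1: hi", 2)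
def pvDiffWitnessOut_extract_assessments_from_ai_response : (List String) × (List String) :=
  (["h", "No assessment"], ["hi", "No assessment"])

-- ===== CLAIM (what is proved, stated in full; the proofs are below) =====
def Claim_unchanged_extract_assessments_from_ai_response : Prop := ∀ (ai_response : String) (num_answers : Int), Dom_extract_assessments_from_ai_response ai_response num_answers → Spec_extract_assessments_from_ai_response ai_response num_answers (extract_assessments_from_ai_response ai_response num_answers)
def Claim_changed_extract_assessments_from_ai_response : Prop := Dom_extract_assessments_from_ai_response (pvDiffWitness_extract_assessments_from_ai_response.1) (pvDiffWitness_extract_assessments_from_ai_response.2) ∧ D_extract_assessments_from_ai_response (pvDiffWitness_extract_assessments_from_ai_response.1) (pvDiffWitness_extract_assessments_from_ai_response.2) ∧ extract_assessments_from_ai_response (pvDiffWitness_extract_assessments_from_ai_response.1) (pvDiffWitness_extract_assessments_from_ai_response.2) = pvDiffWitnessOut_extract_assessments_from_ai_response.1 ∧ extract_assessments_from_ai_response_alt (pvDiffWitness_extract_assessments_from_ai_response.1) (pvDiffWitness_extract_assessments_from_ai_response.2) = pvDiffWitnessOut_extract_assessments_from_ai_response.2 ∧ pvDiffWitnessOut_extract_assessments_from_ai_response.1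 ≠ pvDiffWitnessOut_extract_assessments_from_ai_response.2
def Claim_exact_extract_assessments_from_ai_response : Prop := ∀ (ai_response : String) (num_answers : Int), Dom_extract_assessments_from_ai_response ai_response num_answers → D_extract_assessments_from_ai_response ai_response num_answers → extract_assessments_from_ai_response ai_response num_answers ≠ extract_assessments_from_ai_response_alt ai_response num_answers

-- ===== LEMMAS AND PROOFS =====

-- the full marker text for a digit string ds (proof-side abbreviation)
def pvMarker (ds : List Char) : List Char := "Assessment".toList ++ ds ++ [':']

lemma pv_marker_ne_nil (ds : List Char) : pvMarker ds ≠ [] := by simp [pvMarker]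

lemma pv_infix_dropLast_of_find (s mk : List Char) (j : Nat) (hp : mk <+: s.drop j)
    (hb : j + mk.length < s.length) : mk <:+: s.dropLast := by
  have h1 : mk <+: (s.drop j).take (s.length - 1 - j) :=
    List.prefix_take_iff.mpr ⟨hp, by omega⟩
  rw [← List.drop_take] at h1
  rw [List.dropLast_eq_take]
  exact h1.isInfix.trans (List.drop_suffix j _).isInfix

lemma pv_find_of_infix_dropLast (s mk : List Char) (hne : mk ≠ []) (h : mk <:+: s.dropLast) :
    PySem.Chars.find s mk ≠ -1 ∧ (PySem.Chars.find s mk).toNat + mk.length < s.length := by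
  obtain ⟨pre, suf, hps⟩ := h
  obtain ⟨tl, htl⟩ := List.dropLast_prefix s
  have hs : s = pre ++ (mk ++ (suf ++ tl)) := by
    rw [← htl, ← hps]; simp
  have hmk1 : 1 ≤ mk.length := by
    cases mk with
    | nil => exact absurd rfl hne
    | cons a l => simp
  have hlen : pre.length + mk.length + suf.length = s.length - 1 := by
    have := congrArg List.length hps
    simp at this
    omega
  have hslen : 1 ≤ s.length := by
    rcases Nat.eq_zero_or_pos s.length with h0 | h0
    · exfalso
      have : s = [] := List.eq_nil_of_length_eq_zero h0
      subst this
      simp at hps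
      exact hne hps.2.1
    · omega
  have hpref : mk <+: s.drop pre.length := by
    conv_rhs => rw [hs]
    rw [List.drop_left]
    exact ⟨suf ++ tl, rfl⟩
  have hinf : mk <:+: s := ⟨pre, suf ++ tl, by rw [hs]; simp⟩
  have hfind : PySem.Chars.find s mk ≠ -1 := by
    rw [ne_eq, PySem.Chars.find_eq_neg_one_iff]
    simpa using hinf
  have h0 : 0 ≤ PySem.Chars.find s mk := by
    have := PySem.Chars.neg_one_le_find s mk
    omega
  obtain ⟨hpr, hmin⟩ := PySem.Chars.find_spec h0
  have hle : (PySem.Chars.find s mk).toNat ≤ pre.length := by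
    by_contra hgt
    exact hmin pre.length (by omega) hpref
  exact ⟨hfind, by omega⟩

lemma pv_digitChar_isdigit (r : Nat) (h : r < 10) : PySem.Chars.isdigit (Nat.digitChar r) = true := by
  interval_cases r <;> decide

lemma pv_digitChar_val (r : Nat) (h : r < 10) : ((Nat.digitChar r).toNat : Int) - 48 = (r : Int) := by
  interval_cases r <;> decide

lemma pv_toDigitsCore_fuel : ∀ (f g n : Nat) (l : List Char), n < f → n < g →
    Nat.toDigitsCore 10 f n l = Nat.toDigitsCore 10 g n l := by
  intro f
  induction f with
  | zero => intro g n l hf; omega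
  | succ f ih =>
    intro g n l hf hg
    cases g with
    | zero => omega
    | succ g =>
      simp only [Nat.toDigitsCore]
      split
      · rfl
      · rename_i hnz
        exact ih g (n / 10) _ (by omega) (by omega)

lemma pv_toDigitsCore_append : ∀ (f n : Nat) (l : List Char), n < f →
    Nat.toDigitsCore 10 f n l = Nat.toDigitsCore 10 f n [] ++ l := by
  intro f
  induction f with
  | zero => intro n l hf; omega
  | succ f ih =>
    intro n l hf
    simp only [Nat.toDigitsCore]
    split
    · rfl
    · rename_i hnz
      have hdiv : n / 10 < f := by
        rcases Nat.eq_zero_or_pos f with rfl | hfpos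
        · omega
        · have : n / 10 < n := Nat.div_lt_self (by omega) (by norm_num)
          omega
      rw [ih (n / 10) _ hdiv, ih (n / 10) [Nat.digitChar (n % 10)] hdiv]
      simp

lemma pv_val_toDigits (n : Nat) :
    (Nat.toDigits 10 n).foldl (fun a c => a * 10 + ((c.toNat : Int) - 48)) 0 = (n : Int) := by
  induction n using Nat.strong_induction_on with
  | _ n ih =>
    by_cases hn : n < 10
    · have hz : n / 10 = 0 := Nat.div_eq_of_lt hn
      rw [Nat.toDigits, Nat.toDigitsCore]
      simp only [hz, if_true]
      simp [Nat.mod_eq_of_lt hn]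
      exact pv_digitChar_val n hn
    · have hnz : ¬ n / 10 = 0 := by
        intro h
        have := Nat.lt_of_div_eq_zero (by norm_num) h
        omega
      have hstep : Nat.toDigits 10 n = Nat.toDigits 10 (n / 10) ++ [Nat.digitChar (n % 10)] := by
        rw [Nat.toDigits, Nat.toDigitsCore]
        simp only [hnz, if_false]
        rw [pv_toDigitsCore_append n (n / 10) _ (Nat.div_lt_self (by omega) (by norm_num))]
        rw [Nat.toDigits, pv_toDigitsCore_fuel n (n / 10 + 1) (n / 10) []
          (Nat.div_lt_self (by omega) (by norm_num)) (by omega)]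
      rw [hstep, List.foldl_append]
      rw [ih (n / 10) (Nat.div_lt_self (by omega) (by norm_num))]
      simp only [List.foldl_cons, List.foldl_nil]
      rw [pv_digitChar_val (n % 10) (Nat.mod_lt _ (by norm_num))]
      omega

lemma pv_toChars_eq_toDigits (k : Int) (hk : 0 ≤ k) :
    PySem.Int.toChars k = Nat.toDigits 10 k.toNat := by
  unfold PySem.Int.toChars
  rw [if_neg (by omega)]

lemma pv_val_toChars (k : Int) (hk : 0 ≤ k) :
    (PySem.Int.toChars k).foldl (fun a c => a * 10 + ((c.toNat : Int) - 48)) 0 = k := by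
  rw [pv_toChars_eq_toDigits k hk, pv_val_toDigits]
  omega


lemma pv_toDigitsCore_digits : ∀ (f n : Nat) (l : List Char),
    (∀ c ∈ l, PySem.Chars.isdigit c = true) → ∀ c ∈ Nat.toDigitsCore 10 f n l, PySem.Chars.isdigit c = true := by
  intro f
  induction f with
  | zero => intro n l hl; simpa [Nat.toDigitsCore] using hl
  | succ f ih =>
    intro n l hl c hc
    simp only [Nat.toDigitsCore] at hc
    split at hc
    · rcases List.mem_cons.mp hc with rfl | h
      · exact pv_digitChar_isdigit _ (Nat.mod_lt _ (by norm_num))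
      · exact hl _ h
    · exact ih _ _ (by
        intro c' hc'
        rcases List.mem_cons.mp hc' with rfl | h
        · exact pv_digitChar_isdigit _ (Nat.mod_lt _ (by norm_num))
        · exact hl _ h) _ hc

lemma pv_toDigitsCore_length_lt : ∀ (f n : Nat) (l : List Char), 0 < f →
    l.length < (Nat.toDigitsCore 10 f n l).length := by
  intro f
  induction f with
  | zero => intro n l h; omega
  | succ f ih =>
    intro n l _
    simp only [Nat.toDigitsCore]
    split
    · simp
    · rcases Nat.eq_zero_or_pos f with rfl | hf
      · simp [Nat.toDigitsCore]
      · have := ih (n / 10) (Nat.digitChar (n % 10) :: l) hf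
        simp at this; omega

lemma pv_toChars_digits (k : Int) (hk : 1 ≤ k) :
    PySem.Int.toChars k ≠ [] ∧ ∀ c ∈ PySem.Int.toChars k, PySem.Chars.isdigit c = true := by
  have h : PySem.Int.toChars k = Nat.toDigits 10 k.toNat := by
    simp [PySem.Int.toChars, show ¬ k < 0 by omega]
  rw [h]
  constructor
  · have := pv_toDigitsCore_length_lt (k.toNat + 1) k.toNat [] (by omega)
    intro hcon
    rw [Nat.toDigits] at hcon
    simp [hcon] at this
  · intro c hc
    exact pv_toDigitsCore_digits _ _ [] (by simp) c hc

lemma pv_matchAt_iff (ds cs : List Char) (hne : ds ≠ []) (hdig : ∀ c ∈ ds, PySem.Chars.isdigit c = true) :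
    pvMatchAt cs = some ds ↔ pvMarker ds <+: cs := by
  constructor
  · intro h
    unfold pvMatchAt at h
    split at h
    · rename_i hpre
      simp only at h
      split at h
      · rename_i hcond
        have hds : ds = (cs.drop "Assessment".toList.length).takeWhile PySem.Chars.isdigit :=
          (Option.some_injective _ h).symm
        subst hds
        set rest := cs.drop "Assessment".toList.length with hrest
        set ds := rest.takeWhile PySem.Chars.isdigit with hds
        obtain ⟨-, hhead⟩ := Bool.and_eq_true_iff.mp hcond
        have hsplit : rest = ds ++ rest.drop ds.length := by
          conv_lhs => rw [← List.take_append_drop ds.length rest]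
          congr 1
          exact (List.prefix_iff_eq_take.mp (List.takeWhile_prefix _)).symm
        obtain ⟨t, ht⟩ : ∃ t, rest.drop ds.length = ':' :: t := by
          cases hd : rest.drop ds.length with
          | nil => rw [hd] at hhead; simp at hhead
          | cons a t =>
            rw [hd] at hhead
            have : a = ':' := by simpa using hhead
            exact ⟨t, by rw [this]⟩
        have hcs : cs = "Assessment".toList ++ rest := by
          conv_lhs => rw [← List.take_append_drop "Assessment".toList.length cs]
          congr 1
          exact (List.prefix_iff_eq_take.mp (List.isPrefixOf_iff_prefix.mp hpre)).symm
        refine ⟨t, ?_⟩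
        rw [hcs]
        conv_rhs => rw [hsplit, ht]
        simp [pvMarker]
      · exact absurd h (by simp)
    · exact absurd h (by simp)
  · rintro ⟨t, ht⟩
    unfold pvMatchAt
    have hpre : "Assessment".toList.isPrefixOf cs := by
      rw [List.isPrefixOf_iff_prefix]
      exact ⟨ds ++ [':'] ++ t, by rw [← ht]; simp [pvMarker]⟩
    rw [if_pos hpre]
    have hrest : cs.drop "Assessment".toList.length = ds ++ ':' :: t := by
      have : cs = "Assessment".toList ++ (ds ++ ':' :: t) := by rw [← ht]; simp [pvMarker]
      rw [this, List.drop_left]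
    simp only [hrest]
    have htake : (ds ++ ':' :: t).takeWhile PySem.Chars.isdigit = ds := by
      rw [List.takeWhile_append]
      simp only [List.takeWhile_cons, show PySem.Chars.isdigit ':' = false by decide]
      simp
      exact fun _ x hx => hdig x hx
    rw [htake, List.drop_left]
    simp [hne]

lemma pv_find?_range_eq_some {p : Nat → Bool} {n k : Nat} (hk : k < n) (hp : p k = true)
    (hmin : ∀ i < k, p i = false) : (List.range n).find? p = some k := by
  induction n with
  | zero => omega
  | succ n ih =>
    rw [List.range_succ, List.find?_append]
    rcases Nat.lt_or_ge k n with h | h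
    · rw [ih h]; rfl
    · have hkn : n = k := by omega
      have hnone : (List.range n).find? p = none := by
        rw [List.find?_eq_none]
        intro i hi
        simp [hmin i (by have := List.mem_range.mp hi; omega)]
      rw [hnone]
      simp [hkn, hp]

lemma pv_scan_aux (s ds : List Char) : ∀ (js : List Nat) (d : PySem.Dict (List Char) Int),
    ((js.foldl (fun d j => match pvMatchAt (s.drop j) with
        | some ds' => if d.contains ds' then d else d.insert ds' (j : Int)
        | none => d) d).get? ds)
    = ((d.get? ds).or ((js.find? (fun j => pvMatchAt (s.drop j) == some ds)).map (fun j => (j : Int)))) := by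
  intro js
  induction js with
  | nil => intro d; simp
  | cons j js ih =>
    intro d
    simp only [List.foldl_cons, List.find?_cons]
    cases hm : pvMatchAt (s.drop j) with
    | none => simp [ih]
    | some ds' =>
      rcases eq_or_ne ds' ds with rfl | hd'
      · by_cases hc : d.contains ds' = true
        · simp only [hc, if_true, ih]
          have : (d.get? ds').isSome := by rw [← PySem.Dict.contains_eq_isSome_get?]; exact hc
          obtain ⟨v, hv⟩ := Option.isSome_iff_exists.mp this
          simp [hv]
        · simp only [Bool.not_eq_true] at hc
          simp only [hc, ih]
          have hnone : d.get? ds' = none := by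
            have h := PySem.Dict.contains_eq_isSome_get? d ds'
            rw [hc] at h
            exact Option.not_isSome_iff_eq_none.mp (by rw [← h]; simp)
          simp [hnone]
      · have hb : (some ds' == some ds) = false := by simp; exact fun h => absurd h hd'
        by_cases hc : d.contains ds' = true
        · simp only [hc, if_true, ih, hb]
        · simp only [Bool.not_eq_true] at hc
          simp only [hc, Bool.false_eq_true, if_false, ih, hb]
          rw [PySem.Dict.get?_insert]
          simp [Ne.symm hd']

lemma pv_scan_get? (s ds : List Char) :
    (pvScan s).get? ds =
      ((List.range s.length).find? (fun j => pvMatchAt (s.drop j) == some ds)).map (fun j => (j : Int)) := by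
  unfold pvScan
  rw [PySem.List.pyRange_zero_natCast, List.foldl_map]
  have := pv_scan_aux s ds (List.range s.length) PySem.Dict.empty
  simp only [Int.toNat_natCast] at this ⊢
  rw [this]
  simp

lemma pv_scan_get?_eq (s ds : List Char) (hne : ds ≠ []) (hdig : ∀ c ∈ ds, PySem.Chars.isdigit c = true) :
    (pvScan s).get? ds =
      if PySem.Chars.find s (pvMarker ds) = -1 then none else some (PySem.Chars.find s (pvMarker ds)) := by
  rw [pv_scan_get?]
  by_cases hf : PySem.Chars.find s (pvMarker ds) = -1
  · have hno : ¬ pvMarker ds <:+: s := (PySem.Chars.find_eq_neg_one_iff _ _).mp hf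
    have hnone : (List.range s.length).find? (fun j => pvMatchAt (s.drop j) == some ds) = none := by
      rw [List.find?_eq_none]
      intro j _
      simp only [beq_iff_eq]
      rw [pv_matchAt_iff ds _ hne hdig]
      intro hp
      exact hno ((PySem.Chars.isIn_iff_infix _ _).mp ((PySem.Chars.exists_prefix_drop_iff_isIn _ _).mp ⟨j, hp⟩))
    rw [hnone, if_pos hf]
    rfl
  · have hpos : 0 ≤ PySem.Chars.find s (pvMarker ds) := by
      have := PySem.Chars.neg_one_le_find s (pvMarker ds)
      omega
    obtain ⟨hpref, hmin⟩ := PySem.Chars.find_spec hpos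
    set k := (PySem.Chars.find s (pvMarker ds)).toNat with hk
    have hklen : k < s.length := by
      by_contra hge
      have : s.drop k = [] := List.drop_eq_nil_of_le (by omega)
      rw [this] at hpref
      have := List.IsPrefix.length_le hpref
      simp [pvMarker] at this
    have := pv_find?_range_eq_some (p := fun j => pvMatchAt (s.drop j) == some ds) hklen
      (by simp only [beq_iff_eq]; exact (pv_matchAt_iff ds _ hne hdig).mpr hpref)
      (by intro i hi
          simp only [beq_eq_false_iff_ne, ne_eq]
          rw [pv_matchAt_iff ds _ hne hdig]
          exact hmin i hi)
    rw [this, if_neg hf]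
    simp [hk, Int.toNat_of_nonneg hpos]

lemma pv_takeWhile_digits (ds rest : List Char)
    (hdig : ∀ c ∈ ds, PySem.Chars.isdigit c = true) :
    (ds ++ ':' :: rest).takeWhile PySem.Chars.isdigit = ds := by
  rw [List.takeWhile_append]
  simp only [List.takeWhile_cons, show PySem.Chars.isdigit ':' = false by decide]
  simp
  exact fun _ x hx => hdig x hx

lemma pv_any_of_not_all (o : Option Char) (h : ¬ o.all PySem.Chars.isspace = true) :
    o.any (fun c => !PySem.Chars.isspace c) = true := by
  cases o with
  | none => simp at h
  | some c =>
    simp only [Option.any_some, Option.all_some] at h ⊢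
    cases hc : PySem.Chars.isspace c
    · simp
    · exact absurd hc h

lemma pv_not_all_of_any (o : Option Char) (h : o.any (fun c => !PySem.Chars.isspace c) = true) :
    ¬ o.all PySem.Chars.isspace = true := by
  cases o with
  | none => simp at h
  | some c => simp at h ⊢; simpa using h

lemma pv_D_intro (r : String) (num i : Int) (hi0 : 0 ≤ i) (hlt : i + 1 < num)
    (hinf1 : pvMarker (PySem.Int.toChars (i + 1)) <:+: r.toList.dropLast)
    (hinf2 : ¬ pvMarker (PySem.Int.toChars (i + 2)) <:+: r.toList)
    (hlast : (r.toList.getLast?.any (fun c => !PySem.Chars.isspace c)) = true) :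
    D_extract_assessments_from_ai_response r num := by
  refine ⟨pv_not_all_of_any _ hlast, ?_⟩
  obtain ⟨pre, suf, hps⟩ := id hinf1
  obtain ⟨tl, htl⟩ := List.dropLast_prefix r.toList
  set ds := PySem.Int.toChars (i + 1) with hds
  have hdig : ∀ c ∈ ds, PySem.Chars.isdigit c = true := (pv_toChars_digits (i + 1) (by omega)).2
  have hr : r.toList = pre ++ ("Assessment".toList ++ (ds ++ (':' :: (suf ++ tl)))) := by
    rw [← htl, ← hps]
    simp [pvMarker]
  have hdropp : r.toList.drop (pre.length + 10) = ds ++ ':' :: (suf ++ tl) := by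
    rw [← List.drop_drop, hr, List.drop_left,
      List.drop_left' (show "Assessment".toList.length = 10 from rfl)]
  have hkey : pvKey (r.toList.drop (pre.length + 10)) = i + 1 := by
    unfold pvKey
    rw [hdropp, pv_takeWhile_digits ds _ hdig, hds, pv_val_toChars (i + 1) (by omega)]
  refine ⟨i + 1, List.mem_map.mpr ⟨r.toList.drop (pre.length + 10),
    (List.mem_tails _ _).mpr (List.drop_suffix _ _), hkey⟩, by omega, hlt, ?_, ?_⟩
  · exact hinf1
  · rw [show i + 1 + 1 = i + 2 from by ring]
    exact hinf2

-- per-index entry functions: each port's fold body appends exactly this entry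
def pvEntryA (s : List Char) (num : Int) (i : Int) : String :=
  let start_text := pvMarkerOf (i + 1)
  let next_text  := pvMarkerOf (i + 2)
  let start_index := PySem.Chars.find s start_text
  let end_index := if i + 1 < num then PySem.Chars.find s next_text else (s.length : Int)
  if start_index ≠ -1 then
    String.ofList (PySem.Chars.strip (PySem.Chars.slice s (some (start_index + (start_text.length : Int))) (some end_index)))
  else "No assessment"

def pvEntryB (s : List Char) (num : Int) (i : Int) : String :=
  let key := PySem.Int.toChars (i + 1)
  match (pvScan s).get? key with
  | none => "No assessment"
  | some start =>
    let end_ := if i + 1 < num then (pvScan s).getD (PySem.Int.toChars (i + 2)) (s.length : Int) else (s.length : Int)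
    String.ofList (PySem.Chars.strip (PySem.Chars.slice s
      (some (start + ("Assessment".toList.length : Int) + (key.length : Int) + 1)) (some end_)))

lemma pv_A_eq_map (r : String) (num : Int) :
    extract_assessments_from_ai_response r num = (PySem.List.pyRange 0 num 1).map (pvEntryA r.toList num) := by
  show (PySem.List.pyRange 0 num 1).foldl (fun acc i => acc ++ [pvEntryA r.toList num i]) [] = _
  rw [PySem.List.foldl_append_singleton_eq_map]
  simp

lemma pv_B_eq_map (r : String) (num : Int) :
    extract_assessments_from_ai_response_alt r num = (PySem.List.pyRange 0 num 1).map (pvEntryB r.toList num) := by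
  show (PySem.List.pyRange 0 num 1).foldl (fun acc i => acc ++ [pvEntryB r.toList num i]) [] = _
  rw [PySem.List.foldl_append_singleton_eq_map]
  simp

lemma pv_strip_append_ws (x : List Char) (c : Char) (h : PySem.Chars.isspace c = true) :
    PySem.Chars.strip (x ++ [c]) = PySem.Chars.strip x := by
  unfold PySem.Chars.strip PySem.Chars.lstrip PySem.Chars.rstrip
  rw [List.dropWhile_append]
  split
  · rename_i h'
    simp [h, List.isEmpty_iff.mp h']
  · simp [List.reverse_append, h]

lemma pv_strip_append_nonws (x : List Char) (c : Char) (h : PySem.Chars.isspace c = false) :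
    PySem.Chars.strip (x ++ [c]) = PySem.Chars.lstrip x ++ [c] := by
  unfold PySem.Chars.strip PySem.Chars.lstrip PySem.Chars.rstrip
  rw [List.dropWhile_append]
  split
  · rename_i h'
    simp [h, List.isEmpty_iff.mp h']
  · simp [List.reverse_append, h]

lemma pv_strip_length_le (x : List Char) :
    (PySem.Chars.strip x).length ≤ (PySem.Chars.lstrip x).length := by
  unfold PySem.Chars.strip PySem.Chars.rstrip
  simpa using List.length_dropWhile_le PySem.Chars.isspace (PySem.Chars.lstrip x).reverse

lemma pv_slice_neg_one (s : List Char) (a : Nat) (ha : a ≤ s.length) :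
    PySem.List.slice s (some (a : Int)) (some (-1)) = (s.drop a).dropLast := by
  simp only [PySem.List.slice, PySem.List.clampIdx, List.dropLast_eq_take, List.length_drop]
  rcases Nat.eq_zero_or_pos s.length with h0 | h0
  · simp [List.eq_nil_of_length_eq_zero h0]
  · have h1 : ¬ ((a : Int) < 0) := by omega
    have h2 : ((-1 : Int) < 0) := by omega
    have h3 : ¬ ((s.length : Int) + -1 < 0) := by omega
    simp only [h1, h2, h3, if_true, if_false]
    have h4 : min (a : Int).toNat s.length = a := by omega
    have h5 : ((s.length : Int) + -1).toNat = s.length - 1 := by omega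
    rw [h4, h5]
    congr 1
    omega

lemma pv_slice_full (s : List Char) (a : Nat) :
    PySem.List.slice s (some (a : Int)) (some (s.length : Int)) = s.drop a := by
  rw [PySem.List.slice_natCast]
  exact List.take_of_length_le (by simp)

lemma pv_find_add_len_le (s sub : List Char) (h : PySem.Chars.find s sub ≠ -1) :
    (PySem.Chars.find s sub).toNat + sub.length ≤ s.length := by
  have h0 : 0 ≤ PySem.Chars.find s sub := by
    have := PySem.Chars.neg_one_le_find s sub
    omega
  have hle := PySem.Chars.find_le_length s sub
  have hpref := (PySem.Chars.find_spec h0).1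
  have := hpref.length_le
  simp only [List.length_drop] at this
  omega

-- both entries at an index i where "Assessment(i+1):" occurs but "Assessment(i+2):" does not:
-- A's slice ends at -1 (dropLast), B's at the end of the string
lemma pv_entry_interesting (s : List Char) (num i : Int) (hi0 : 0 ≤ i) (hlt : i + 1 < num)
    (hj : PySem.Chars.find s (pvMarker (PySem.Int.toChars (i + 1))) ≠ -1)
    (h2 : PySem.Chars.find s (pvMarker (PySem.Int.toChars (i + 2))) = -1) :
    pvEntryA s num i = String.ofList (PySem.Chars.strip ((s.drop
        ((PySem.Chars.find s (pvMarker (PySem.Int.toChars (i + 1)))).toNat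
          + (pvMarker (PySem.Int.toChars (i + 1))).length)).dropLast)) ∧
    pvEntryB s num i = String.ofList (PySem.Chars.strip (s.drop
        ((PySem.Chars.find s (pvMarker (PySem.Int.toChars (i + 1)))).toNat
          + (pvMarker (PySem.Int.toChars (i + 1))).length))) := by
  obtain ⟨hne1, hdig1⟩ := pv_toChars_digits (i + 1) (by omega)
  obtain ⟨hne2, hdig2⟩ := pv_toChars_digits (i + 2) (by omega)
  have h0 : 0 ≤ PySem.Chars.find s (pvMarker (PySem.Int.toChars (i + 1))) := by
    have := PySem.Chars.neg_one_le_find s (pvMarker (PySem.Int.toChars (i + 1)))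
    omega
  set j := PySem.Chars.find s (pvMarker (PySem.Int.toChars (i + 1))) with hjdef
  set aN : Nat := j.toNat + (pvMarker (PySem.Int.toChars (i + 1))).length with haN
  have haNle : aN ≤ s.length := pv_find_add_len_le s _ hj
  have hstartA : j + ((pvMarker (PySem.Int.toChars (i + 1))).length : Int) = (aN : Int) := by
    rw [haN]; push_cast [Int.toNat_of_nonneg h0]; ring
  have hstartB : j + ("Assessment".toList.length : Int) + ((PySem.Int.toChars (i + 1)).length : Int) + 1
      = (aN : Int) := by
    rw [haN]
    have hlen : (pvMarker (PySem.Int.toChars (i + 1))).length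
        = "Assessment".toList.length + (PySem.Int.toChars (i + 1)).length + 1 := by
      simp [pvMarker]; omega
    rw [hlen]
    push_cast [Int.toNat_of_nonneg h0]
    ring
  constructor
  · simp only [pvEntryA]
    rw [show pvMarkerOf (i + 1) = pvMarker (PySem.Int.toChars (i + 1)) from rfl,
        show pvMarkerOf (i + 2) = pvMarker (PySem.Int.toChars (i + 2)) from rfl]
    rw [← hjdef, if_pos hlt, h2, if_pos hj, hstartA]
    rw [PySem.Chars.slice_eq_listSlice, pv_slice_neg_one s aN haNle]
  · simp only [pvEntryB]
    rw [pv_scan_get?_eq s _ hne1 hdig1, ← hjdef, if_neg hj]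
    rw [if_pos hlt, PySem.Dict.getD_eq_get?_getD, pv_scan_get?_eq s _ hne2 hdig2, h2, if_pos rfl]
    simp only [Option.getD_none, hstartB]
    rw [PySem.Chars.slice_eq_listSlice, pv_slice_full]

lemma pv_entry_eq (s : List Char) (num i : Int) (hi0 : 0 ≤ i)
    (hnC : ¬ (i + 1 < num ∧
        pvMarker (PySem.Int.toChars (i + 1)) <:+: s.dropLast ∧
        ¬ pvMarker (PySem.Int.toChars (i + 2)) <:+: s ∧
        (s.getLast?.any (fun c => !PySem.Chars.isspace c)) = true)) :
    pvEntryA s num i = pvEntryB s num i := by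
  obtain ⟨hne1, hdig1⟩ := pv_toChars_digits (i + 1) (by omega)
  obtain ⟨hne2, hdig2⟩ := pv_toChars_digits (i + 2) (by omega)
  by_cases hj : PySem.Chars.find s (pvMarker (PySem.Int.toChars (i + 1))) = -1
  · -- marker absent: both "No assessment"
    simp only [pvEntryA, pvEntryB]
    rw [pv_scan_get?_eq s _ hne1 hdig1]
    rw [show pvMarkerOf (i + 1) = pvMarker (PySem.Int.toChars (i + 1)) from rfl]
    simp [hj]
  · have h0 : 0 ≤ PySem.Chars.find s (pvMarker (PySem.Int.toChars (i + 1))) := by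
      have := PySem.Chars.neg_one_le_find s (pvMarker (PySem.Int.toChars (i + 1)))
      omega
    set j := PySem.Chars.find s (pvMarker (PySem.Int.toChars (i + 1))) with hjdef
    set aN : Nat := j.toNat + (pvMarker (PySem.Int.toChars (i + 1))).length with haN
    have haNle : aN ≤ s.length := pv_find_add_len_le s _ hj
    have hstartA : j + ((pvMarker (PySem.Int.toChars (i + 1))).length : Int) = (aN : Int) := by
      rw [haN]; push_cast [Int.toNat_of_nonneg h0]; ring
    have hstartB : j + ("Assessment".toList.length : Int) + ((PySem.Int.toChars (i + 1)).length : Int) + 1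
        = (aN : Int) := by
      rw [haN]
      have hlen : (pvMarker (PySem.Int.toChars (i + 1))).length
          = "Assessment".toList.length + (PySem.Int.toChars (i + 1)).length + 1 := by
        simp [pvMarker]; omega
      rw [hlen]
      push_cast [Int.toNat_of_nonneg h0]
      ring
    by_cases hlt : i + 1 < num
    · by_cases h2 : PySem.Chars.find s (pvMarker (PySem.Int.toChars (i + 2))) = -1
      · -- next marker absent: A slices to -1, B to the end; equal because
        -- either the slice starts at the very end or the last character is whitespace
        obtain ⟨hA, hB⟩ := pv_entry_interesting s num i hi0 hlt hj h2
        rw [hA, hB, ← hjdef, ← haN]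
        by_cases hlen : aN < s.length
        · have hinf1 : pvMarker (PySem.Int.toChars (i + 1)) <:+: s.dropLast :=
            pv_infix_dropLast_of_find s _ j.toNat (PySem.Chars.find_spec h0).1 (by omega)
          have hinf2 : ¬ pvMarker (PySem.Int.toChars (i + 2)) <:+: s :=
            (PySem.Chars.find_eq_neg_one_iff _ _).mp h2
          have hws : (s.getLast?.any (fun c => !PySem.Chars.isspace c)) = false := by
            by_contra hx
            exact hnC ⟨hlt, hinf1, hinf2, by simpa using hx⟩
          have hsne : s ≠ [] := by intro h; subst h; simp at hlen
          have htne : s.drop aN ≠ [] := by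
            intro h
            rw [List.drop_eq_nil_iff] at h
            omega
          have hlast : (s.drop aN).getLast? = s.getLast? := by
            rw [List.getLast?_drop, if_neg (by omega)]
          have hc := List.getLast?_eq_some_getLast hsne
          set c := s.getLast hsne with hcdef
          have hcws : PySem.Chars.isspace c = true := by
            rw [hc] at hws
            simpa using hws
          have hct : s.drop aN = (s.drop aN).dropLast ++ [c] := by
            have hg := List.getLast?_eq_some_getLast htne
            rw [hlast, hc] at hg
            conv_lhs => rw [← List.dropLast_append_getLast htne]
            rw [Option.some_injective _ hg.symm]
          conv_rhs => rw [hct]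
          rw [pv_strip_append_ws _ _ hcws]
        · have haNeq : aN = s.length := by omega
          rw [haNeq, List.drop_length]
          simp
      · obtain ⟨hA, hB⟩ : pvEntryA s num i = String.ofList (PySem.Chars.strip (PySem.Chars.slice s
            (some (aN : Int)) (some (PySem.Chars.find s (pvMarker (PySem.Int.toChars (i + 2))))))) ∧
            pvEntryB s num i = String.ofList (PySem.Chars.strip (PySem.Chars.slice s
            (some (aN : Int)) (some (PySem.Chars.find s (pvMarker (PySem.Int.toChars (i + 2))))))) := by
          constructor
          · simp only [pvEntryA]
            rw [show pvMarkerOf (i + 1) = pvMarker (PySem.Int.toChars (i + 1)) from rfl,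
                show pvMarkerOf (i + 2) = pvMarker (PySem.Int.toChars (i + 2)) from rfl]
            rw [← hjdef, if_pos hlt, if_pos hj, hstartA]
          · simp only [pvEntryB]
            rw [pv_scan_get?_eq s _ hne1 hdig1, ← hjdef, if_neg hj]
            rw [PySem.Dict.getD_eq_get?_getD, pv_scan_get?_eq s _ hne2 hdig2]
            simp only [if_pos hlt, if_neg h2, Option.getD_some, hstartB]
        rw [hA, hB]
    · -- last answer: both slice to the end of the string
      simp only [pvEntryA, pvEntryB]
      rw [show pvMarkerOf (i + 1) = pvMarker (PySem.Int.toChars (i + 1)) from rfl]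
      rw [pv_scan_get?_eq s _ hne1 hdig1, ← hjdef, if_neg hj, if_pos hj]
      simp only [if_neg hlt, hstartA, hstartB]

-- ===== VERDICT (by name: the statements are the Claim_ definitions above) =====
theorem extract_assessments_from_ai_response_spec : Claim_unchanged_extract_assessments_from_ai_response := by
  intro ai_response num_answers _
  unfold Spec_extract_assessments_from_ai_response
  intro hnD
  rw [pv_A_eq_map, pv_B_eq_map]
  rw [List.map_inj_left]
  intro i hi
  have hi0 : 0 ≤ i := (PySem.List.mem_pyRange_one.mp hi).1
  have hilt : i < num_answers := (PySem.List.mem_pyRange_one.mp hi).2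
  apply pv_entry_eq _ _ _ hi0
  intro ⟨u1, u2, u3, u4⟩
  exact hnD (pv_D_intro ai_response num_answers i hi0 u1 u2 u3 u4)

theorem extract_assessments_from_ai_response_changed : Claim_changed_extract_assessments_from_ai_response := by
  unfold Claim_changed_extract_assessments_from_ai_response
  decide

theorem extract_assessments_from_ai_response_tight : Claim_exact_extract_assessments_from_ai_response := by
  intro ai_response num_answers _ hD hEq
  obtain ⟨hlastAll, k, hkmem, hk1, hknum, hinf1, hninf⟩ := hD
  set s := ai_response.toList with hs
  have hlast : (s.getLast?.any (fun c => !PySem.Chars.isspace c)) = true :=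
    pv_any_of_not_all _ hlastAll
  set i : Int := k - 1 with hidef
  have hkeq : i + 1 = k := by omega
  have hkeq2 : i + 2 = k + 1 := by omega
  have hi0 : 0 ≤ i := by omega
  have hlt : i + 1 < num_answers := by omega
  have hi : i ∈ PySem.List.pyRange 0 num_answers 1 :=
    PySem.List.mem_pyRange_one.mpr ⟨by omega, by omega⟩
  have hin1 : pvMarker (PySem.Int.toChars (i + 1)) <:+: s.dropLast := by
    rw [hkeq]
    exact hinf1
  have hnin2 : ¬ pvMarker (PySem.Int.toChars (i + 2)) <:+: s := by
    rw [hkeq2]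
    exact hninf
  obtain ⟨hj, hlenN⟩ := pv_find_of_infix_dropLast s _ (pv_marker_ne_nil _) hin1
  have h2 : PySem.Chars.find s (pvMarker (PySem.Int.toChars (i + 2))) = -1 :=
    (PySem.Chars.find_eq_neg_one_iff _ _).mpr hnin2
  obtain ⟨hA, hB⟩ := pv_entry_interesting s num_answers i hi0 hlt hj h2
  have hent : pvEntryA s num_answers i = pvEntryB s num_answers i := by
    rw [pv_A_eq_map, pv_B_eq_map] at hEq
    exact List.map_inj_left.mp hEq i hi
  rw [hA, hB] at hent
  have h0 : 0 ≤ PySem.Chars.find s (pvMarker (PySem.Int.toChars (i + 1))) := by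
    have := PySem.Chars.neg_one_le_find s (pvMarker (PySem.Int.toChars (i + 1)))
    omega
  set aN : Nat := (PySem.Chars.find s (pvMarker (PySem.Int.toChars (i + 1)))).toNat
      + (pvMarker (PySem.Int.toChars (i + 1))).length with haN
  have haNlt : aN < s.length := by
    rw [haN]
    exact hlenN
  have htne : s.drop aN ≠ [] := by
    intro h
    rw [List.drop_eq_nil_iff] at h
    omega
  have hlastd : (s.drop aN).getLast? = s.getLast? := by
    rw [List.getLast?_drop, if_neg (by omega)]
  have hc := List.getLast?_eq_some_getLast htne
  set c := (s.drop aN).getLast htne with hcdef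
  have hcnws : PySem.Chars.isspace c = false := by
    rw [← hlastd, hc] at hlast
    simpa using hlast
  have hct : s.drop aN = (s.drop aN).dropLast ++ [c] :=
    (List.dropLast_append_getLast htne).symm
  rw [hct, pv_strip_append_nonws _ _ hcnws] at hent
  have hlists : PySem.Chars.strip ((s.drop aN).dropLast)
      = PySem.Chars.lstrip ((s.drop aN).dropLast) ++ [c] := by
    simpa using congrArg String.toList hent
  have := pv_strip_length_le ((s.drop aN).dropLast)
  rw [hlists] at this
  simp at this
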